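-- pv_equiv track=rewrite | github.com/buyaoxiangtale/LabUtopia | roomlayout/12_17/process_nonfloor_objects.py | find_object_by_id
-- ===== SOURCE A (Python) =====
-- from typing import Dict, Optional, Tuple
--
-- def _norm(s: str) -> str:
--     """规范化字符串：去除下划线/空格/横线，转小写"""
--     if not s:
--         return ""
--     return str(s).lower().replace(" ", "").replace("-", "").replace("_", "")
--
-- def find_object_by_id(obj_id: str, objects: list) -> Optional[dict]:
--     """
--     在 objects 列表中查找指定 id 的对象
--     支持规范化匹配和模糊匹配
--     """
--     norm_id = _norm(obj_id)
--
--     # 精确匹配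
--     for obj in objects:
--         obj_id_real = obj.get("id", "")
--         if _norm(obj_id_real) == norm_id:
--             return obj
--
--     # 模糊匹配
--     for obj in objects:
--         obj_id_real = obj.get("id", "")
--         if _norm(obj_id_real).startswith(norm_id) or norm_id.startswith(_norm(obj_id_real)):
--             return obj
--
--     return None
-- ===== SOURCE B (Python) =====
-- def _norm(s: str) -> str:
--     if not s:
--         return ""
--     return str(s).lower().replace(" ", "").replace("-", "").replace("_", "")
--
-- def find_object_by_id(obj_id: str, objects: list):
--     norm_id = _norm(obj_id)
--     fuzzy = None
--     for obj in objects: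
--         n = _norm(obj.get("id", ""))
--         if n == norm_id:
--             return obj
--         if fuzzy is None and (n.startswith(norm_id) or norm_id.startswith(n)):
--             fuzzy = obj
--     return fuzzy
-- ===== Notes on version B (the rewrite author's own statement) =====
-- stated objective: simpler
-- what changed: Replaces A's two sequential scans (an exact-match pass followed by a fuzzy-match pass) with a single pass that returns on the first exact match and otherwise remembers the first fuzzy match in one local variable.
import Mathlib
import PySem

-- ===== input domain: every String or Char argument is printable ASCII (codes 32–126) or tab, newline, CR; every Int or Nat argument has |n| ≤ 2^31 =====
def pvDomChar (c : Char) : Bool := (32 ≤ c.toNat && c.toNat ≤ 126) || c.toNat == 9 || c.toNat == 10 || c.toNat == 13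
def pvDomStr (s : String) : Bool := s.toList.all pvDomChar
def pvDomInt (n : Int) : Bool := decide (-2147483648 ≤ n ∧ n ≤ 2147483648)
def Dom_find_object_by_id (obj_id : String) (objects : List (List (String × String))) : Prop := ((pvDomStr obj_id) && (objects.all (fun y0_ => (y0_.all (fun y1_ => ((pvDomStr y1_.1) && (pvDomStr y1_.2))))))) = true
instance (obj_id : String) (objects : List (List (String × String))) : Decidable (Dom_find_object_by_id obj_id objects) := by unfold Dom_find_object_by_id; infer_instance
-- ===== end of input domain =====

-- B makes one pass that returns the first exact match and otherwise the first-recorded fuzzy match,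
-- instead of A's two sequential scans; equivalence of return values is proved below.

-- ===== PORT A =====
-- _norm: lower, then strip " ", "-", "_" (the 'if not s' branch returns "" which the chain also does)
def pvNorm (s : String) : String :=
  if s = "" then ""
  else PySem.Str.replace (PySem.Str.replace (PySem.Str.replace (PySem.Str.lower s) " " "") "-" "") "_" ""

-- first loop of A: exact match
def pvExactScan (norm_id : String) : List (List (String × String)) → Option (List (String × String))
  | [] => none
  | obj :: rest =>
    if pvNorm (PySem.Dict.getD (PySem.Dict.ofList obj) "id" "") = norm_id then some obj
    else pvExactScan norm_id rest

-- second loop of A: fuzzy match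
def pvFuzzyScan (norm_id : String) : List (List (String × String)) → Option (List (String × String))
  | [] => none
  | obj :: rest =>
    if PySem.Str.startswith (pvNorm (PySem.Dict.getD (PySem.Dict.ofList obj) "id" "")) norm_id
        || PySem.Str.startswith norm_id (pvNorm (PySem.Dict.getD (PySem.Dict.ofList obj) "id" "")) then some obj
    else pvFuzzyScan norm_id rest

def find_object_by_id (obj_id : String) (objects : List (List (String × String))) : Option (List (String × String)) :=
  let norm_id := pvNorm obj_id
  match pvExactScan norm_id objects with
  | some obj => some obj
  | none =>
    match pvFuzzyScan norm_id objects with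
    | some obj => some obj
    | none => none

-- ===== PORT B =====
-- single pass: return on exact match, remember first fuzzy match
def pvOnePass (norm_id : String) (fuzzy : Option (List (String × String))) :
    List (List (String × String)) → Option (List (String × String))
  | [] => fuzzy
  | obj :: rest =>
    let n := pvNorm (PySem.Dict.getD (PySem.Dict.ofList obj) "id" "")
    if n = norm_id then some obj
    else
      if fuzzy = none && (PySem.Str.startswith n norm_id || PySem.Str.startswith norm_id n) then
        pvOnePass norm_id (some obj) rest
      else pvOnePass norm_id fuzzy rest

def find_object_by_id_alt (obj_id : String) (objects : List (List (String × String))) : Option (List (String × String)) :=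
  pvOnePass (pvNorm obj_id) none objects

-- ===== PRECONDITION & SPEC =====
def Spec_find_object_by_id (obj_id : String) (objects : List (List (String × String))) (out : Option (List (String × String))) : Prop := out = find_object_by_id_alt obj_id objects
instance (obj_id : String) (objects : List (List (String × String))) (out : Option (List (String × String))) : Decidable (Spec_find_object_by_id obj_id objects out) := by unfold Spec_find_object_by_id; infer_instance

-- ===== CLAIM (what is proved, stated in full; the proofs are below) =====
def Claim_equal_find_object_by_id : Prop := ∀ (obj_id : String) (objects : List (List (String × String))), Dom_find_object_by_id obj_id objects → Spec_find_object_by_id obj_id objects (find_object_by_id obj_id objects)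

-- ===== LEMMAS AND PROOFS =====

-- the single pass equals: exact scan result if any, else the recorded fuzzy (if any), else the fuzzy scan result
theorem pvOnePass_eq (norm_id : String) (objects : List (List (String × String)))
    (fuzzy : Option (List (String × String))) :
    pvOnePass norm_id fuzzy objects =
      match pvExactScan norm_id objects with
      | some obj => some obj
      | none =>
        match fuzzy with
        | some f => some f
        | none => pvFuzzyScan norm_id objects := by
  induction objects generalizing fuzzy with
  | nil => cases fuzzy <;> simp [pvOnePass, pvExactScan, pvFuzzyScan]
  | cons obj rest ih =>
    by_cases hx : pvNorm ((PySem.Dict.ofList obj).getD "id" "") = norm_id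
    · cases fuzzy <;> simp [pvOnePass, pvExactScan, hx]
    · cases fuzzy with
      | some f => simp [pvOnePass, pvExactScan, hx, ih]
      | none =>
        by_cases hc : (PySem.Str.startswith (pvNorm ((PySem.Dict.ofList obj).getD "id" "")) norm_id
            || PySem.Str.startswith norm_id (pvNorm ((PySem.Dict.ofList obj).getD "id" ""))) = true
        all_goals simp only [pvOnePass, pvExactScan, pvFuzzyScan, ih, hx, if_false]
        all_goals simp_all

-- ===== VERDICT (by name: the statement is the Claim_ definition above) =====
theorem find_object_by_id_spec : Claim_equal_find_object_by_id := by
  intro obj_id objects _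
  unfold Spec_find_object_by_id find_object_by_id find_object_by_id_alt
  rw [pvOnePass_eq]
  cases hE : pvExactScan (pvNorm obj_id) objects <;> simp [hE]
  all_goals cases pvFuzzyScan (pvNorm obj_id) objects <;> simp
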